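-- pv_equiv track=rewrite | github.com/xiaowucn/Scriber-Backend | remarkable/common/diff/diff.py | group_diff_by_type
-- ===== SOURCE A (Python) =====
-- def group_diff_by_type(chars_diff: list[dict[str, str]]) -> list[dict[str, str | int]]:
--     if not chars_diff:
--         return []
--     para_diff = chars_diff[0]
--     for char_diff in chars_diff[1:]:
--         if para_diff["diff"] == char_diff["diff"]:
--             para_diff["text"] = para_diff["text"] + char_diff["text"]
--             continue
--         yield para_diff
--         para_diff = char_diff
--     yield para_diff
-- ===== SOURCE B (Python) =====
-- def group_diff_by_type(chars_diff: list[dict[str, str]]) -> list[dict[str, str | int]]: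
--     # Backward pass: walk the list right-to-left, accumulating the pending text of
--     # the tail of the current run; at each run start, stamp the accumulated text
--     # onto that first-of-run dict (mutated in place, like A) and collect it.
--     # The collected run starts come out right-to-left, so reverse at the end.
--     res = []
--     acc = None
--     for i in range(len(chars_diff) - 1, -1, -1):
--         d = chars_diff[i]
--         if i > 0 and chars_diff[i - 1]["diff"] == d["diff"]:
--             acc = d["text"] if acc is None else d["text"] + acc
--         else:
--             if acc is not None:
--                 d["text"] = d["text"] + acc
--                 acc = None
--             res.append(d)
--     yield from reversed(res)
-- ===== Notes on version B (the rewrite author's own statement) =====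
-- stated objective: alternative
-- what changed: Replaces A's forward carry-the-previous-entry loop (which grows the first dict's text as it walks left-to-right) with a backward pass: walk the list right-to-left accumulating the pending tail text of the current run, stamp it onto each run's first dict when the run start is reached, collect the run starts and reverse at the end.
import Mathlib
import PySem

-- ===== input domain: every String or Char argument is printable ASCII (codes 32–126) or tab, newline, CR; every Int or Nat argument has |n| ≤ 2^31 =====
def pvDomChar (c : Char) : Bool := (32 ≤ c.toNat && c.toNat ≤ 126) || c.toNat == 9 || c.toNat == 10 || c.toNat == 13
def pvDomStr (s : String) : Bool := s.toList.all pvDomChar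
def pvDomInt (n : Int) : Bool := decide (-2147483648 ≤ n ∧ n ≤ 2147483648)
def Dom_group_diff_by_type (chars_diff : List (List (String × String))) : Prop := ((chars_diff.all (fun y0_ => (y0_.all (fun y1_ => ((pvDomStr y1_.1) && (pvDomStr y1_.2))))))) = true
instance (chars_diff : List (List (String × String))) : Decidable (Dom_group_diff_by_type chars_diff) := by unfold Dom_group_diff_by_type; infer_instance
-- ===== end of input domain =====

-- B merges runs of equal 'diff' by a backward pass (accumulate the run's tail text right-to-left,
-- stamp it onto the run's first dict, reverse the collected run starts) instead of A's forward
-- carry loop; equivalence is about the yielded sequence of values — both Pythons mutate the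
-- first dict of each run in place in the same way (A lazily, B eagerly before the first yield).

-- ===== PORT A =====
-- d["diff"] / d["text"]: under Pre_ every access A or B performs hits a present key, so getD's default is never used
def pvKey (d : PySem.Dict String String) : String := d.getD "diff" ""

def pvText (d : PySem.Dict String String) : String := d.getD "text" ""

def pvMergeText (a b : PySem.Dict String String) : PySem.Dict String String :=
  a.insert "text" (pvText a ++ pvText b)

-- the 'for char_diff in chars_diff[1:]' loop: state = (yielded prefix, para_diff)
def groupA_loop (out : List (List (String × String))) (para : PySem.Dict String String) :
    List (List (String × String)) → List (List (String × String))
  | [] => out ++ [para.items]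
  | c :: cs =>
    let cd := PySem.Dict.mk c
    if pvKey para = pvKey cd then groupA_loop out (pvMergeText para cd) cs
    else groupA_loop (out ++ [para.items]) cd cs

def group_diff_by_type (chars_diff : List (List (String × String))) : List (List (String × String)) :=
  match chars_diff with
  | [] => []
  | first :: rest => groupA_loop [] (PySem.Dict.mk first) rest

-- ===== PORT B =====
-- B's backward loop 'for i in range(len-1, -1, -1)'. goB prev l processes the elements of l
-- right-to-left (prev is the element to the left of l, i.e. the loop's chars_diff[i-1] when i
-- reaches l's head); it returns (acc, res) = the pending run-tail text and the run-start dicts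
-- collected so far (in append, i.e. right-to-left, order), exactly the Python loop's state.
def goB (prev : List (String × String)) :
    List (List (String × String)) → Option String × List (List (String × String))
  | [] => (none, [])
  | d :: rest =>
    let (acc, res) := goB d rest
    if pvKey (PySem.Dict.mk prev) = pvKey (PySem.Dict.mk d) then
      (some (match acc with
             | none => pvText (PySem.Dict.mk d)
             | some a => pvText (PySem.Dict.mk d) ++ a), res)
    else
      match acc with
      | some a =>
        (none, res ++ [((PySem.Dict.mk d).insert "text" (pvText (PySem.Dict.mk d) ++ a)).items])
      | none => (none, res ++ [(PySem.Dict.mk d).items])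

def group_diff_by_type_alt (chars_diff : List (List (String × String))) : List (List (String × String)) :=
  match chars_diff with
  | [] => []
  | d :: rest =>
    -- the loop's final step i = 0 ('i > 0' is false: always a run start), then reversed(res)
    let (acc, res) := goB d rest
    let d' := match acc with
      | some a => ((PySem.Dict.mk d).insert "text" (pvText (PySem.Dict.mk d) ++ a)).items
      | none => (PySem.Dict.mk d).items
    (res ++ [d']).reverse

-- ===== PRECONDITION & SPEC =====
-- Pre_ excludes exactly the inputs on which A raises KeyError: an adjacent pair missing a 'diff'
-- key, or an adjacent equal-'diff' pair missing a 'text' key (B raises KeyError on exactly the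
-- same inputs).
def Pre_group_diff_by_type (chars_diff : List (List (String × String))) : Prop :=
  ∀ p ∈ chars_diff.zip chars_diff.tail,
    ((PySem.Dict.mk p.1).get? "diff").isSome = true ∧
    ((PySem.Dict.mk p.2).get? "diff").isSome = true ∧
    ((PySem.Dict.mk p.1).get? "diff" = (PySem.Dict.mk p.2).get? "diff" →
      ((PySem.Dict.mk p.1).get? "text").isSome = true ∧ ((PySem.Dict.mk p.2).get? "text").isSome = true)
instance (chars_diff : List (List (String × String))) : Decidable (Pre_group_diff_by_type chars_diff) := by
  unfold Pre_group_diff_by_type; infer_instance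

def pvWitness_group_diff_by_type : (List (List (String × String))) :=
  [[("diff", "-"), ("text", "a")], [("diff", "-"), ("text", "b")], [("diff", "+"), ("text", "c")]]

def Spec_group_diff_by_type (chars_diff : List (List (String × String))) (out : List (List (String × String))) : Prop := out = group_diff_by_type_alt chars_diff
instance (chars_diff : List (List (String × String))) (out : List (List (String × String))) : Decidable (Spec_group_diff_by_type chars_diff out) := by unfold Spec_group_diff_by_type; infer_instance

-- ===== CLAIM (what is proved, stated in full; the proofs are below) =====
def Claim_equal_group_diff_by_type : Prop := ∀ (chars_diff : List (List (String × String))), Dom_group_diff_by_type chars_diff → Pre_group_diff_by_type chars_diff → Spec_group_diff_by_type chars_diff (group_diff_by_type chars_diff)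

-- ===== LEMMAS AND PROOFS =====

-- Common yardstick: the maximal runs of adjacent equal-'diff' entries, and a run folded into its
-- first dict. Both ports are proved equal to (pvRuns l).map pvMergeGroup.
def pvRunsFrom (p : List (String × String)) :
    List (List (String × String)) → List (List (List (String × String)))
  | [] => [[p]]
  | c :: cs =>
    if pvKey (PySem.Dict.mk p) = pvKey (PySem.Dict.mk c) then
      match pvRunsFrom c cs with
      | [] => [[p]]
      | g :: gs => (p :: g) :: gs
    else [p] :: pvRunsFrom c cs

def pvRuns : List (List (String × String)) → List (List (List (String × String)))
  | [] => []
  | x :: r => pvRunsFrom x r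

def pvMergeGroup : List (List (String × String)) → List (String × String)
  | [] => []
  | f :: rest =>
    (rest.foldl (fun acc item => pvMergeText acc (PySem.Dict.mk item)) (PySem.Dict.mk f)).items

def pvJoinTexts : List (List (String × String)) → String
  | [] => ""
  | d :: rest => pvText (PySem.Dict.mk d) ++ pvJoinTexts rest

theorem pvKey_merge (a b : PySem.Dict String String) : pvKey (pvMergeText a b) = pvKey a := by
  unfold pvKey pvMergeText
  rw [PySem.Dict.getD_insert]
  simp

-- pvRunsFrom p cs = (p :: t) :: gs, and the tail shape depends on p only through its key
theorem pvRunsFrom_head (p : List (String × String)) (cs : List (List (String × String))) :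
    ∃ t gs, pvRunsFrom p cs = (p :: t) :: gs ∧
      (∀ q, pvKey (PySem.Dict.mk q) = pvKey (PySem.Dict.mk p) → pvRunsFrom q cs = (q :: t) :: gs) := by
  cases cs with
  | nil => exact ⟨[], [], rfl, fun q _ => rfl⟩
  | cons c cs =>
    by_cases h : pvKey (PySem.Dict.mk p) = pvKey (PySem.Dict.mk c)
    · obtain ⟨t, gs, hc, _⟩ := pvRunsFrom_head c cs
      refine ⟨c :: t, gs, ?_, ?_⟩
      · simp [pvRunsFrom, h, hc]
      · intro q hq
        simp [pvRunsFrom, hq.trans h, hc]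
    · refine ⟨[], pvRunsFrom c cs, ?_, ?_⟩
      · simp [pvRunsFrom, h]
      · intro q hq
        have h2 : ¬ pvKey (PySem.Dict.mk q) = pvKey (PySem.Dict.mk c) := fun e => h (hq.symm.trans e)
        simp [pvRunsFrom, h2]

-- A's carry loop computes the runs-map
theorem groupA_loop_eq (rest : List (List (String × String))) :
    ∀ (para : PySem.Dict String String) (out : List (List (String × String))),
      groupA_loop out para rest = out ++ (pvRunsFrom para.items rest).map pvMergeGroup := by
  induction rest with
  | nil => intro para out; simp [groupA_loop, pvRunsFrom, pvMergeGroup]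
  | cons c cs ih =>
    intro para out
    by_cases h : pvKey para = pvKey (PySem.Dict.mk c)
    · have hloop : groupA_loop out para (c :: cs) = groupA_loop out (pvMergeText para (PySem.Dict.mk c)) cs := by
        simp [groupA_loop, h]
      rw [hloop, ih]
      obtain ⟨t, gs, hc, hcongr⟩ := pvRunsFrom_head c cs
      have hm : pvRunsFrom (pvMergeText para (PySem.Dict.mk c)).items cs
          = ((pvMergeText para (PySem.Dict.mk c)).items :: t) :: gs := by
        apply hcongr
        show pvKey (pvMergeText para (PySem.Dict.mk c)) = _
        rw [pvKey_merge, h]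
      have hp : pvRunsFrom para.items (c :: cs) = (para.items :: c :: t) :: gs := by
        have hkp : pvKey (PySem.Dict.mk para.items) = pvKey (PySem.Dict.mk c) := h
        simp [pvRunsFrom, hkp, hc]
      rw [hm, hp]
      simp [pvMergeGroup, List.foldl]
    · have hloop : groupA_loop out para (c :: cs) = groupA_loop (out ++ [para.items]) (PySem.Dict.mk c) cs := by
        simp [groupA_loop, h]
      rw [hloop, ih]
      have hp : pvRunsFrom para.items (c :: cs) = [para.items] :: pvRunsFrom c cs := by
        have hkp : ¬ pvKey (PySem.Dict.mk para.items) = pvKey (PySem.Dict.mk c) := h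
        simp [pvRunsFrom, hkp]
      rw [hp]
      simp [pvMergeGroup]

-- folding a run's tail into its first dict = one insert of the concatenated texts
theorem fold_merge (rest : List (List (String × String))) :
    ∀ (dct : PySem.Dict String String), rest ≠ [] →
      rest.foldl (fun acc item => pvMergeText acc (PySem.Dict.mk item)) dct
        = dct.insert "text" (pvText dct ++ pvJoinTexts rest) := by
  induction rest with
  | nil => intro _ h; exact absurd rfl h
  | cons c cs ih =>
    intro dct _
    cases cs with
    | nil => simp [List.foldl, pvMergeText, pvJoinTexts]
    | cons e es =>
      have : (c :: e :: es).foldl (fun acc item => pvMergeText acc (PySem.Dict.mk item)) dct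
          = (e :: es).foldl (fun acc item => pvMergeText acc (PySem.Dict.mk item))
              (pvMergeText dct (PySem.Dict.mk c)) := rfl
      rw [this, ih _ (by simp)]
      unfold pvMergeText
      rw [PySem.Dict.insert_insert_self]
      have ht : pvText (dct.insert "text" (pvText dct ++ pvText (PySem.Dict.mk c)))
          = pvText dct ++ pvText (PySem.Dict.mk c) := by
        unfold pvText
        rw [PySem.Dict.getD_insert]; simp
      rw [ht]
      simp [pvJoinTexts, String.append_assoc]

theorem goB_cons (prev d : List (String × String)) (rest : List (List (String × String))) :
    goB prev (d :: rest) =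
      if pvKey (PySem.Dict.mk prev) = pvKey (PySem.Dict.mk d) then
        (some (match (goB d rest).1 with
               | none => pvText (PySem.Dict.mk d)
               | some a => pvText (PySem.Dict.mk d) ++ a), (goB d rest).2)
      else
        match (goB d rest).1 with
        | some a =>
          (none, (goB d rest).2 ++ [((PySem.Dict.mk d).insert "text" (pvText (PySem.Dict.mk d) ++ a)).items])
        | none => (none, (goB d rest).2 ++ [(PySem.Dict.mk d).items]) := by
  cases hgo : goB d rest with
  | mk acc res => simp only [goB, hgo]

theorem pvMergeGroup_cons (f : List (String × String)) (t : List (List (String × String)))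
    (h : t ≠ []) :
    pvMergeGroup (f :: t)
      = ((PySem.Dict.mk f).insert "text" (pvText (PySem.Dict.mk f) ++ pvJoinTexts t)).items := by
  simp only [pvMergeGroup]
  rw [fold_merge t _ h]

-- B's backward loop characterised by the runs of its remaining segment
theorem goB_eq (l : List (List (String × String))) :
    ∀ prev, goB prev l =
      match pvRuns l with
      | [] => (none, [])
      | r :: rs =>
        if pvKey (PySem.Dict.mk prev) = pvKey (PySem.Dict.mk (r.headD [])) then
          (some (pvJoinTexts r), (rs.map pvMergeGroup).reverse)
        else (none, ((r :: rs).map pvMergeGroup).reverse) := by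
  induction l with
  | nil => intro prev; simp [goB, pvRuns]
  | cons d rest ih =>
    intro prev
    cases rest with
    | nil =>
      by_cases h : pvKey (PySem.Dict.mk prev) = pvKey (PySem.Dict.mk d)
      · simp [goB, pvRuns, pvRunsFrom, h, pvJoinTexts]
      · simp [goB, pvRuns, pvRunsFrom, h, pvMergeGroup]
    | cons e rest' =>
      obtain ⟨t, gs, he, _⟩ := pvRunsFrom_head e rest'
      by_cases hde : pvKey (PySem.Dict.mk d) = pvKey (PySem.Dict.mk e)
      · -- d continues into e's run
        have hruns : pvRuns (d :: e :: rest') = (d :: e :: t) :: gs := by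
          simp [pvRuns, pvRunsFrom, hde, he]
        have hih := ih d
        rw [show pvRuns (e :: rest') = (e :: t) :: gs from by simp [pvRuns, he]] at hih
        simp only [List.headD, hde] at hih
        by_cases h : pvKey (PySem.Dict.mk prev) = pvKey (PySem.Dict.mk d)
        · rw [goB_cons, hih]
          simp [h, hruns, pvJoinTexts]
        · rw [goB_cons, hih]
          have hm := pvMergeGroup_cons d (e :: t) (by simp)
          simp [h, hruns, hm, pvJoinTexts]
      · -- d is a singleton run start before e's run
        have hruns : pvRuns (d :: e :: rest') = [d] :: (e :: t) :: gs := by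
          simp [pvRuns, pvRunsFrom, hde, he]
        have hih := ih d
        rw [show pvRuns (e :: rest') = (e :: t) :: gs from by simp [pvRuns, he]] at hih
        simp only [List.headD, if_neg hde] at hih
        by_cases h : pvKey (PySem.Dict.mk prev) = pvKey (PySem.Dict.mk d)
        · rw [goB_cons, hih]
          simp [h, hruns, pvJoinTexts]
        · rw [goB_cons, hih]
          simp [h, hruns, pvMergeGroup]

-- B computes the runs-map
theorem groupB_eq (l : List (List (String × String))) :
    group_diff_by_type_alt l = (pvRuns l).map pvMergeGroup := by
  cases l with
  | nil => rfl
  | cons d rest =>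
    obtain ⟨t, gs, hd, _⟩ := pvRunsFrom_head d rest
    have hruns : pvRuns (d :: rest) = (d :: t) :: gs := by simp [pvRuns, hd]
    cases rest with
    | nil =>
      simp [group_diff_by_type_alt, goB, pvRuns, pvRunsFrom, pvMergeGroup]
    | cons e rest' =>
      obtain ⟨t', gs', he, _⟩ := pvRunsFrom_head e rest'
      have hgo := goB_eq (e :: rest') d
      rw [show pvRuns (e :: rest') = (e :: t') :: gs' from by simp [pvRuns, he]] at hgo
      by_cases hde : pvKey (PySem.Dict.mk d) = pvKey (PySem.Dict.mk e)
      · simp only [List.headD, if_pos hde] at hgo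
        simp only [group_diff_by_type_alt]
        rw [hgo]
        rw [show pvRuns (d :: e :: rest') = (d :: e :: t') :: gs' from by
          simp [pvRuns, pvRunsFrom, hde, he]]
        have hm := pvMergeGroup_cons d (e :: t') (by simp)
        simp [hm, pvJoinTexts]
      · simp only [List.headD, if_neg hde] at hgo
        simp only [group_diff_by_type_alt]
        rw [hgo]
        rw [show pvRuns (d :: e :: rest') = [d] :: (e :: t') :: gs' from by
          simp [pvRuns, pvRunsFrom, hde, he]]
        simp [pvMergeGroup]

-- ===== VERDICT (by name: the statement is the Claim_ definition above) =====
theorem group_diff_by_type_spec : Claim_equal_group_diff_by_type := by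
  intro chars_diff _ _
  unfold Spec_group_diff_by_type group_diff_by_type
  rw [groupB_eq]
  cases chars_diff with
  | nil => rfl
  | cons first rest => simpa [pvRuns] using groupA_loop_eq rest (PySem.Dict.mk first) []
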